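-- pv_equiv track=rewrite | github.com/totosuki/code-history | totosuki/Python/paiza/B095.py | return_score
-- ===== SOURCE A (Python) =====
-- def return_score(lines, collect_lines):
--   score = 100
--   for i, line in enumerate(lines):
--     diff = abs(line - collect_lines[i])
--     if diff <= 5:
--       continue
--     elif diff <= 10:
--       score -= 1
--       continue
--     elif diff <= 20:
--       score -= 2
--     elif diff <= 30:
--       score -= 3
--     else:
--       score -= 5
--   if score < 0:
--     score = 0
--   return score
-- ===== SOURCE B (Python) =====
-- def return_score(lines, collect_lines):
--     # Band-counting: the per-element penalty 0/1/2/3/5 decomposes into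
--     # indicator counts: total = #(d>5) + #(d>10) + #(d>20) + 2*#(d>30).
--     diffs = [abs(a - b) for a, b in zip(lines, collect_lines)]
--     over5 = sum(1 for d in diffs if d > 5)
--     over10 = sum(1 for d in diffs if d > 10)
--     over20 = sum(1 for d in diffs if d > 20)
--     over30 = sum(1 for d in diffs if d > 30)
--     return max(0, 100 - (over5 + over10 + over20 + 2 * over30))
-- ===== Notes on version B (the rewrite author's own statement) =====
-- stated objective: alternative
-- what changed: Replaces the per-element if/elif penalty ladder by a band-counting decomposition: compute the diff list once, count in staged passes how many diffs exceed 5, 10, 20 and 30, and combine the counts arithmetically (total = c5+c10+c20+2*c30, score = max(0,100-total)); no per-element penalty is ever looked up.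
-- outside the precondition, e.g. on return_score([1, 2], [1]): A raises IndexError, B returns 100
import Mathlib
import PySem

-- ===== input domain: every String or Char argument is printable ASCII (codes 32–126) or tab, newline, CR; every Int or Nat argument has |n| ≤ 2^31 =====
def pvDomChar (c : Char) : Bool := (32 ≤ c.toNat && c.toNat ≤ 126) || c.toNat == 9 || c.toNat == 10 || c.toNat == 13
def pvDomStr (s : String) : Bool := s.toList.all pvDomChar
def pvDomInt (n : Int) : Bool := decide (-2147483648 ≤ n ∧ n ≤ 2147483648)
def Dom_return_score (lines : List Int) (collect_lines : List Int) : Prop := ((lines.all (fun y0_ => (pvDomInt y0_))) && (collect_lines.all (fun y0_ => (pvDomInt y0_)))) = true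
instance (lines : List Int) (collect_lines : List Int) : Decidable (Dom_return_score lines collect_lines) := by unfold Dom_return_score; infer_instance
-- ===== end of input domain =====

-- B replaces A's per-element if/elif penalty ladder by a band-counting decomposition:
-- build the diff list once, count in staged passes how many diffs exceed 5/10/20/30,
-- and return max(0, 100 - (c5+c10+c20+2*c30)); objective: alternative.
-- (Pre_ excludes inputs where A raises IndexError.)


-- ===== PORT A =====
def return_score (lines : List Int) (collect_lines : List Int) : Int :=
  let score := (PySem.List.enumerate lines).foldl (fun score p =>
    let diff := |p.2 - PySem.List.pyGetD collect_lines p.1 0|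
    if diff ≤ 5 then score
    else if diff ≤ 10 then score - 1
    else if diff ≤ 20 then score - 2
    else if diff ≤ 30 then score - 3
    else score - 5) 100
  if score < 0 then 0 else score

-- ===== PORT B =====
def return_score_alt (lines : List Int) (collect_lines : List Int) : Int :=
  let diffs := (lines.zip collect_lines).map (fun p => |p.1 - p.2|)
  let over5 : Int := (diffs.filter (fun d => 5 < d)).length
  let over10 : Int := (diffs.filter (fun d => 10 < d)).length
  let over20 : Int := (diffs.filter (fun d => 20 < d)).length
  let over30 : Int := (diffs.filter (fun d => 30 < d)).length
  max 0 (100 - (over5 + over10 + over20 + 2 * over30))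

-- ===== PRECONDITION & SPEC =====
-- Pre_ excludes exactly the inputs on which A raises IndexError (lines longer than collect_lines).
def Pre_return_score (lines : List Int) (collect_lines : List Int) : Prop :=
  lines.length ≤ collect_lines.length
instance (lines : List Int) (collect_lines : List Int) : Decidable (Pre_return_score lines collect_lines) := by unfold Pre_return_score; infer_instance
def pvWitness_return_score : List Int × List Int := ([3, 20], [5, 40])

def Spec_return_score (lines : List Int) (collect_lines : List Int) (out : Int) : Prop := out = return_score_alt lines collect_lines
instance (lines : List Int) (collect_lines : List Int) (out : Int) : Decidable (Spec_return_score lines collect_lines out) := by unfold Spec_return_score; infer_instance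

-- ===== CLAIM (what is proved, stated in full; the proofs are below) =====
def Claim_equal_return_score : Prop := ∀ (lines : List Int) (collect_lines : List Int), Dom_return_score lines collect_lines → Pre_return_score lines collect_lines → Spec_return_score lines collect_lines (return_score lines collect_lines)

-- ===== LEMMAS AND PROOFS =====

-- per-diff penalty as a sum of band indicators
def pvPen (d : Int) : Int :=
  (if 5 < d then 1 else 0) + (if 10 < d then 1 else 0)
    + (if 20 < d then 1 else 0) + 2 * (if 30 < d then 1 else 0)

-- A's ladder step equals subtracting the indicator sum
theorem pvStep_eq (s d : Int) :
    (if d ≤ 5 then s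
     else if d ≤ 10 then s - 1
     else if d ≤ 20 then s - 2
     else if d ≤ 30 then s - 3
     else s - 5) = s - pvPen d := by
  unfold pvPen; split_ifs <;> omega

-- A's indexed loop, started at index k, equals s minus the indicator-sum over the zipped tail
theorem pvLoop_eq (xs : List Int) : ∀ (cl : List Int) (k : Nat) (s : Int),
    k + xs.length ≤ cl.length →
    (PySem.List.enumerate xs (k : Int)).foldl (fun score p =>
        let diff := |p.2 - PySem.List.pyGetD cl p.1 0|
        if diff ≤ 5 then score
        else if diff ≤ 10 then score - 1
        else if diff ≤ 20 then score - 2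
        else if diff ≤ 30 then score - 3
        else score - 5) s
      = s - ((xs.zip (cl.drop k)).map (fun p => pvPen |p.1 - p.2|)).sum := by
  induction xs with
  | nil => intro cl k s _; simp [PySem.List.enumerate_nil]
  | cons x xs ih =>
    intro cl k s h
    have hk : k < cl.length := by simp at h; omega
    have hdrop : cl.drop k = cl[k] :: cl.drop (k + 1) := by
      rw [List.drop_eq_getElem_cons hk]
    have hget : PySem.List.pyGetD cl (k : Int) 0 = cl[k] := by
      simp [PySem.List.pyGetD_natCast, hk]
    rw [PySem.List.enumerate_cons, List.foldl_cons]
    simp only [hget]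
    rw [pvStep_eq]
    have : ((k : Int) + 1) = ((k + 1 : Nat) : Int) := by push_cast; ring
    rw [this, ih cl (k + 1) _ (by simp at h ⊢; omega), hdrop, List.zip_cons_cons,
      List.map_cons, List.sum_cons]
    ring

-- B's four staged counts combine to the indicator-sum
theorem pvCounts_eq (l : List Int) :
    ((l.filter (fun d => 5 < d)).length : Int) + ((l.filter (fun d => 10 < d)).length : Int)
      + ((l.filter (fun d => 20 < d)).length : Int)
      + 2 * ((l.filter (fun d => 30 < d)).length : Int)
      = (l.map pvPen).sum := by
  induction l with
  | nil => simp
  | cons d l ih =>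
    simp only [List.filter_cons, List.map_cons, List.sum_cons, pvPen] at ih ⊢
    split_ifs <;> simp_all [List.length_cons] <;> omega

-- ===== VERDICT (by name: the statement is the Claim_ definition above) =====
theorem return_score_spec : Claim_equal_return_score := by
  intro lines collect_lines _ hpre
  unfold Spec_return_score return_score return_score_alt
  have h0 : (0 : Nat) + lines.length ≤ collect_lines.length := by simpa using hpre
  have hl := pvLoop_eq lines collect_lines 0 100 h0
  simp only [Nat.cast_zero, List.drop_zero] at hl
  rw [hl]
  have hc := pvCounts_eq ((lines.zip collect_lines).map (fun p => |p.1 - p.2|))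
  rw [List.map_map] at hc
  simp only [Function.comp_def] at hc
  rw [← hc]
  have hmax : ∀ s : Int, (if s < 0 then 0 else s) = max 0 s := by intro s; omega
  exact hmax _
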